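-- pv_equiv track=rewrite | github.com/wzygxr/shuati | class091_IntervalDynamicProgramming/Code13_MaximumScoreFromPerformingMultiplicationOperations.py | maximumScoreOptimized
-- ===== SOURCE A (Python) =====
-- from typing import List
--
-- def maximumScoreOptimized(nums: List[int], multipliers: List[int]) -> int:
--     """
--     优化版本：使用一维DP数组
--     时间复杂度：O(m^2)
--     空间复杂度：O(m)
--     """
--     n = len(nums)
--     m = len(multipliers)
--
--     # dp[i]表示取了i个开头元素时的最大分数
--     dp = [-10**9] * (m + 1)
--     dp[0] = 0
--
--     # 动态规划
--     for op in range(m):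
--         next_dp = [-10**9] * (m + 1)
--
--         for left in range(op + 2):
--             right = op + 1 - left
--
--             # 情况1：当前取的是开头元素
--             if left > 0:
--                 score1 = dp[left - 1] + multipliers[op] * nums[left - 1]
--                 next_dp[left] = max(next_dp[left], score1)
--
--             # 情况2：当前取的是结尾元素
--             if right > 0:
--                 score2 = dp[left] + multipliers[op] * nums[n - right]
--                 next_dp[left] = max(next_dp[left], score2)
--
--         dp = next_dp
--
--     # 找到最大分数
--     max_score = -10**9
--     for score in dp:
--         if score > max_score:
--             max_score = score
--
--     return max_score
-- ===== SOURCE B (Python) =====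
-- from typing import List
--
-- def maximumScoreOptimized(nums: List[int], multipliers: List[int]) -> int:
--     """Top-down memoized recursion over (operations done, fronts taken)."""
--     n = len(nums)
--     m = len(multipliers)
--     memo = {}
--
--     def g(op: int, left: int) -> int:
--         # best score achievable by the first `op` operations with `left` taken from the front
--         if op == 0:
--             return 0 if left == 0 else -10**9
--         if (op, left) in memo:
--             return memo[(op, left)]
--         best = -10**9
--         if left > 0:
--             best = max(best, g(op - 1, left - 1) + multipliers[op - 1] * nums[left - 1])
--         if left < op:
--             best = max(best, g(op - 1, left) + multipliers[op - 1] * nums[n - (op - left)])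
--         memo[(op, left)] = best
--         return best
--
--     best = g(m, 0)
--     for left in range(1, m + 1):
--         best = max(best, g(m, left))
--     return best
-- ===== Notes on version B (the rewrite author's own statement) =====
-- stated objective: alternative
-- what changed: Replaced A's bottom-up iterative DP with a rolling one-dimensional array and a final scan by a top-down memoized recursion g(op, left) (best score of the first op operations with left elements taken from the front), answering max over g(m, left).
import Mathlib
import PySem

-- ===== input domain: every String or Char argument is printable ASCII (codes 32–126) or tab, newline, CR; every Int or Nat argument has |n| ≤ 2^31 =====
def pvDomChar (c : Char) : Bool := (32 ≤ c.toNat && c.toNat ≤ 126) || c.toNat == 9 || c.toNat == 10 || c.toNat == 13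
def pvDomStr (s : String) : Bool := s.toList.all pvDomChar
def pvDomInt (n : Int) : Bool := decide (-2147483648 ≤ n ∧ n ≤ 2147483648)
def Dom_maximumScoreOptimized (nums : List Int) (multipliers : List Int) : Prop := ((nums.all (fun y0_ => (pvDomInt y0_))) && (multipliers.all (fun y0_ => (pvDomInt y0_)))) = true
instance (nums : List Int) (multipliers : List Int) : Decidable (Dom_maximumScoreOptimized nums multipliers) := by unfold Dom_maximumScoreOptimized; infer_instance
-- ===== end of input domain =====

-- B replaces A's bottom-up rolling 1-D DP array by a top-down memoized recursion on
-- (operations done, fronts taken); equality of RETURN values is proved on Pre_ (len multipliers ≤ len nums).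

-- ===== PORT A =====
-- one iteration of A's inner `for left in range(op + 2)` loop body
def pvStep (multipliers dp nums : List Int) (n op : Int) (next : List Int) (left : Int) : List Int :=
  let right := op + 1 - left
  let next1 :=
    if left > 0 then
      PySem.List.pySetD next left (max (PySem.List.pyGetD next left 0)
        (PySem.List.pyGetD dp (left - 1) 0 +
          PySem.List.pyGetD multipliers op 0 * PySem.List.pyGetD nums (left - 1) 0))
    else next
  if right > 0 then
    PySem.List.pySetD next1 left (max (PySem.List.pyGetD next1 left 0)
      (PySem.List.pyGetD dp left 0 +
        PySem.List.pyGetD multipliers op 0 * PySem.List.pyGetD nums (n - right) 0))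
  else next1

def maximumScoreOptimized (nums : List Int) (multipliers : List Int) : Int :=
  let n : Int := nums.length
  let m : Nat := multipliers.length
  let dp0 := PySem.List.pySetD (List.replicate (m + 1) (-1000000000 : Int)) 0 0
  let dpF := (PySem.List.pyRange 0 (m : Int) 1).foldl
    (fun dp op =>
      (PySem.List.pyRange 0 (op + 2) 1).foldl (pvStep multipliers dp nums n op)
        (List.replicate (m + 1) (-1000000000 : Int)))
    dp0
  dpF.foldl (fun ms s => if s > ms then s else ms) (-1000000000 : Int)

-- ===== PORT B =====
-- Source B's g(op, left): best score of the first `op` operations with `left` taken from the front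
def pvG (nums multipliers : List Int) (n : Int) : Nat → Int → Int
  | 0, left => if left = 0 then 0 else -1000000000
  | op + 1, left =>
    let best : Int := -1000000000
    let best :=
      if left > 0 then
        max best (pvG nums multipliers n op (left - 1) +
          PySem.List.pyGetD multipliers (op : Int) 0 * PySem.List.pyGetD nums (left - 1) 0)
      else best
    if left < (op : Int) + 1 then
      max best (pvG nums multipliers n op left +
        PySem.List.pyGetD multipliers (op : Int) 0 *
          PySem.List.pyGetD nums (n - ((op : Int) + 1 - left)) 0)
    else best

def maximumScoreOptimized_alt (nums : List Int) (multipliers : List Int) : Int :=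
  let n : Int := nums.length
  let m : Nat := multipliers.length
  (PySem.List.pyRange 1 ((m : Int) + 1) 1).foldl
    (fun best l => max best (pvG nums multipliers n m l))
    (pvG nums multipliers n m 0)

-- ===== PRECONDITION & SPEC =====
-- Pre_ excludes exactly the inputs where Python A raises IndexError: whenever
-- len(multipliers) > len(nums) A's loop reaches nums[n] (so A returns on no excluded input).
def Pre_maximumScoreOptimized (nums : List Int) (multipliers : List Int) : Prop :=
  multipliers.length ≤ nums.length
instance (nums : List Int) (multipliers : List Int) : Decidable (Pre_maximumScoreOptimized nums multipliers) := by unfold Pre_maximumScoreOptimized; infer_instance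

def pvWitness_maximumScoreOptimized : List Int × List Int := ([3, -2, 5], [2, 1])

def Spec_maximumScoreOptimized (nums : List Int) (multipliers : List Int) (out : Int) : Prop := out = maximumScoreOptimized_alt nums multipliers
instance (nums : List Int) (multipliers : List Int) (out : Int) : Decidable (Spec_maximumScoreOptimized nums multipliers out) := by unfold Spec_maximumScoreOptimized; infer_instance

-- ===== CLAIM (what is proved, stated in full; the proofs are below) =====
def Claim_equal_maximumScoreOptimized : Prop := ∀ (nums : List Int) (multipliers : List Int), Dom_maximumScoreOptimized nums multipliers → Pre_maximumScoreOptimized nums multipliers → Spec_maximumScoreOptimized nums multipliers (maximumScoreOptimized nums multipliers)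

-- ===== LEMMAS AND PROOFS =====

-- the value A's dp array holds at (conceptual) index l after `op` outer iterations
def pvVal (nums multipliers : List Int) (n : Int) (op : Nat) (l : Int) : Int :=
  if 0 ≤ l ∧ l ≤ (op : Int) then pvG nums multipliers n op l else -1000000000

def pvD (nums multipliers : List Int) (n : Int) (m op : Nat) : List Int :=
  (PySem.List.pyRange 0 ((m + 1 : Nat) : Int) 1).map (pvVal nums multipliers n op)

lemma pvG_ge (nums multipliers : List Int) (n : Int) (op : Nat) (left : Int) :
    -1000000000 ≤ pvG nums multipliers n op left := by
  cases op with
  | zero => simp only [pvG]; split <;> omega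
  | succ op =>
    simp only [pvG]
    split
    · split
      · exact le_trans (le_trans (le_max_left _ _) (le_max_left _ _)) (le_refl _)
      · exact le_max_left _ _
    · split
      · exact le_max_left _ _
      · exact le_refl _

lemma pvSet_map_pyRange (N : Nat) (f : Int → Int) (k : Int) (h0 : 0 ≤ k) (_hk : k < (N : Int)) (v : Int) :
    PySem.List.pySetD ((PySem.List.pyRange 0 (N : Int) 1).map f) k v
      = (PySem.List.pyRange 0 (N : Int) 1).map (fun l => if l = k then v else f l) := by
  rw [PySem.List.pySetD_of_nonneg _ _ h0]
  apply List.ext_getElem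
  · simp [PySem.List.length_pyRange_one]
  · intro i h1 h2
    simp only [List.getElem_set, List.getElem_map, PySem.List.getElem_pyRange_one]
    by_cases h : k.toNat = i
    · have : (0 : Int) + (i : Int) = k := by omega
      simp [h, this]
    · have hne : ¬ ((i : Int) = k) := by omega
      simp [h, hne]

lemma pvReplicate_eq_map (N : Nat) (c : Int) :
    List.replicate N c = (PySem.List.pyRange 0 (N : Int) 1).map (fun _ => c) := by
  apply List.ext_getElem
  · simp [PySem.List.length_pyRange_one]
  · intro i h1 h2; simp

lemma pvGetD_pvD (nums multipliers : List Int) (n : Int) (m op : Nat) (i : Int)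
    (h0 : 0 ≤ i) (hi : i < ((m + 1 : Nat) : Int)) :
    PySem.List.pyGetD (pvD nums multipliers n m op) i 0 = pvVal nums multipliers n op i := by
  unfold pvD
  have := PySem.List.pyGetD_map_pyRange_of_nonneg (pvVal nums multipliers n op) ((m + 1 : Nat) : Int) i 0 h0 hi
  simpa using this

lemma pvInner (nums multipliers : List Int) (n : Int) (m op j : Nat)
    (hop : op < m) (hj : j ≤ op + 2) :
    (PySem.List.pyRange 0 (j : Int) 1).foldl
      (pvStep multipliers (pvD nums multipliers n m op) nums n (op : Int))
      (List.replicate (m + 1) (-1000000000 : Int))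
    = (PySem.List.pyRange 0 ((m + 1 : Nat) : Int) 1).map
        (fun l => if 0 ≤ l ∧ l < (j : Int) then pvG nums multipliers n (op + 1) l else -1000000000) := by
  induction j with
  | zero =>
    rw [PySem.List.pyRange_one_eq_nil (by omega), List.foldl_nil, pvReplicate_eq_map (m + 1)]
    apply List.map_congr_left
    intro l hl
    have hne : ¬ (0 ≤ l ∧ l < ((0 : Nat) : Int)) := by omega
    rw [if_neg hne]
  | succ j ih =>
    have hjm : (j : Int) < ((m + 1 : Nat) : Int) := by push_cast; omega
    have hj0 : (0 : Int) ≤ (j : Int) := by omega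
    rw [show ((j + 1 : Nat) : Int) = (j : Int) + 1 by push_cast; ring,
      PySem.List.pyRange_one_succ_right (by omega), List.foldl_append, ih (by omega),
      List.foldl_cons, List.foldl_nil]
    -- the value A's inner body stores at index j
    have hPj : PySem.List.pyGetD
        ((PySem.List.pyRange 0 ((m + 1 : Nat) : Int) 1).map
          (fun l => if 0 ≤ l ∧ l < (j : Int) then pvG nums multipliers n (op + 1) l else -1000000000))
        (j : Int) 0 = -1000000000 := by
      rw [PySem.List.pyGetD_map_pyRange_of_nonneg _ _ _ _ hj0 hjm]
      simp
    unfold pvStep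
    by_cases hjpos : (j : Int) > 0
    · -- branch 1 fires
      rw [if_pos hjpos]
      rw [pvSet_map_pyRange _ _ _ hj0 hjm, hPj]
      have hdp1 : PySem.List.pyGetD (pvD nums multipliers n m op) ((j : Int) - 1) 0
          = pvG nums multipliers n op ((j : Int) - 1) := by
        rw [pvGetD_pvD _ _ _ _ _ _ (by omega) (by push_cast; omega)]
        unfold pvVal
        rw [if_pos (by omega)]
      rw [hdp1]
      set b1 : Int := max (-1000000000)
        (pvG nums multipliers n op ((j : Int) - 1) +
          PySem.List.pyGetD multipliers (op : Int) 0 * PySem.List.pyGetD nums ((j : Int) - 1) 0) with hb1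
      have hgetb1 : PySem.List.pyGetD
          ((PySem.List.pyRange 0 ((m + 1 : Nat) : Int) 1).map
            (fun l => if l = (j : Int) then b1
              else if 0 ≤ l ∧ l < (j : Int) then pvG nums multipliers n (op + 1) l else -1000000000))
          (j : Int) 0 = b1 := by
        rw [PySem.List.pyGetD_map_pyRange_of_nonneg _ _ _ _ hj0 hjm]
        simp
      by_cases hr : (op : Int) + 1 - (j : Int) > 0
      · rw [if_pos hr, hgetb1]
        have hdp2 : PySem.List.pyGetD (pvD nums multipliers n m op) (j : Int) 0
            = pvG nums multipliers n op (j : Int) := by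
          rw [pvGetD_pvD _ _ _ _ _ _ hj0 hjm]
          unfold pvVal
          rw [if_pos (by omega)]
        rw [hdp2, pvSet_map_pyRange _ _ _ hj0 hjm]
        apply List.map_congr_left
        intro l hl
        rcases PySem.List.mem_pyRange_one.mp hl with ⟨hl0, hlm⟩
        by_cases hlj : l = (j : Int)
        · rw [if_pos hlj, if_pos (by omega)]
          rw [hlj]
          simp only [pvG]
          rw [if_pos hjpos, if_pos (by omega), hb1]
        · rw [if_neg hlj, if_neg hlj]
          by_cases hc : 0 ≤ l ∧ l < (j : Int)
          · rw [if_pos hc, if_pos (by omega)]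
          · rw [if_neg hc, if_neg (by omega)]
      · rw [if_neg hr]
        apply List.map_congr_left
        intro l hl
        rcases PySem.List.mem_pyRange_one.mp hl with ⟨hl0, hlm⟩
        by_cases hlj : l = (j : Int)
        · rw [if_pos hlj, if_pos (by omega)]
          rw [hlj]
          simp only [pvG]
          rw [if_pos hjpos, if_neg (by omega), hb1]
        · rw [if_neg hlj]
          by_cases hc : 0 ≤ l ∧ l < (j : Int)
          · rw [if_pos hc, if_pos (by omega)]
          · rw [if_neg hc, if_neg (by omega)]
    · -- j = 0 : branch 1 skipped, branch 2 fires (right = op+1 > 0)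
      have hj00 : (j : Int) = 0 := by omega
      rw [if_neg hjpos, if_pos (by omega), hPj]
      have hdp2 : PySem.List.pyGetD (pvD nums multipliers n m op) (j : Int) 0
          = pvG nums multipliers n op (j : Int) := by
        rw [pvGetD_pvD _ _ _ _ _ _ hj0 hjm]
        unfold pvVal
        rw [if_pos (by omega)]
      rw [hdp2, pvSet_map_pyRange _ _ _ hj0 hjm]
      apply List.map_congr_left
      intro l hl
      rcases PySem.List.mem_pyRange_one.mp hl with ⟨hl0, hlm⟩
      by_cases hlj : l = (j : Int)
      · rw [if_pos hlj, if_pos (by omega)]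
        rw [hlj]
        simp only [pvG]
        rw [if_neg (by omega : ¬ ((j : Int) > 0)), if_pos (by omega)]
      · rw [if_neg hlj]
        by_cases hc : 0 ≤ l ∧ l < (j : Int)
        · rw [if_pos hc, if_pos (by omega)]
        · rw [if_neg hc, if_neg (by omega)]

lemma pvOuterInv (nums multipliers : List Int) (n : Int) (m t : Nat) (ht : t ≤ m) :
    (PySem.List.pyRange 0 (t : Int) 1).foldl
      (fun dp op =>
        (PySem.List.pyRange 0 (op + 2) 1).foldl (pvStep multipliers dp nums n op)
          (List.replicate (m + 1) (-1000000000 : Int)))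
      (PySem.List.pySetD (List.replicate (m + 1) (-1000000000 : Int)) 0 0)
    = pvD nums multipliers n m t := by
  induction t with
  | zero =>
    rw [PySem.List.pyRange_one_eq_nil (by omega), List.foldl_nil,
      pvReplicate_eq_map (m + 1), pvSet_map_pyRange _ _ _ (by omega) (by push_cast; omega)]
    apply List.map_congr_left
    intro l hl
    rcases PySem.List.mem_pyRange_one.mp hl with ⟨hl0, hlm⟩
    unfold pvVal
    by_cases hl00 : l = 0
    · subst hl00
      rw [if_pos rfl, if_pos (by omega)]
      rw [pvG]
      simp
    · rw [if_neg hl00, if_neg (by omega)]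
  | succ t ih =>
    rw [show ((t + 1 : Nat) : Int) = (t : Int) + 1 by push_cast; ring,
      PySem.List.pyRange_one_succ_right (by omega), List.foldl_append, ih (by omega),
      List.foldl_cons, List.foldl_nil]
    have h2 : (t : Int) + 2 = ((t + 2 : Nat) : Int) := by push_cast; ring
    rw [h2, pvInner nums multipliers n m t (t + 2) (by omega) (le_refl _)]
    apply List.map_congr_left
    intro l hl
    rcases PySem.List.mem_pyRange_one.mp hl with ⟨hl0, hlm⟩
    unfold pvVal
    by_cases hc : 0 ≤ l ∧ l < ((t + 2 : Nat) : Int)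
    · rw [if_pos hc, if_pos (by push_cast; omega)]
    · rw [if_neg hc, if_neg (by push_cast; omega)]

lemma pvFold_max (xs : List Int) (init : Int) :
    xs.foldl (fun ms s => if s > ms then s else ms) init = xs.foldl max init := by
  induction xs generalizing init with
  | nil => rfl
  | cons x t ih =>
    simp only [List.foldl_cons, ih]
    congr 1
    rcases lt_trichotomy init x with h | h | h <;> simp [max_def] <;> omega

-- ===== VERDICT (by name: the statement is the Claim_ definition above) =====
theorem maximumScoreOptimized_spec : Claim_equal_maximumScoreOptimized := by
  intro nums multipliers hdom hpre
  unfold Spec_maximumScoreOptimized maximumScoreOptimized maximumScoreOptimized_alt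
  simp only
  rw [pvOuterInv nums multipliers (nums.length : Int) multipliers.length multipliers.length
    (le_refl _)]
  rw [pvFold_max]
  unfold pvD
  rw [PySem.List.pyRange_one_cons (by omega), List.map_cons, List.foldl_cons]
  have h00 : pvVal nums multipliers (nums.length : Int) multipliers.length 0
      = pvG nums multipliers (nums.length : Int) multipliers.length 0 := by
    unfold pvVal
    rw [if_pos (by omega)]
  rw [h00, max_eq_right (pvG_ge _ _ _ _ _),
    show ((0 : Int) + 1) = 1 from by norm_num,
    show ((multipliers.length + 1 : Nat) : Int) = ((multipliers.length : Int) + 1) from by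
      push_cast; ring]
  have hmap : (PySem.List.pyRange 1 ((multipliers.length : Int) + 1) 1).map
        (pvVal nums multipliers (nums.length : Int) multipliers.length)
      = (PySem.List.pyRange 1 ((multipliers.length : Int) + 1) 1).map
        (fun l => pvG nums multipliers (nums.length : Int) multipliers.length l) := by
    apply List.map_congr_left
    intro l hl
    rcases PySem.List.mem_pyRange_one.mp hl with ⟨hl0, hlm⟩
    unfold pvVal
    rw [if_pos (by omega)]
  rw [hmap, List.foldl_map]
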